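-- pv_equiv track=rewrite | github.com/Aminesbaillo/leetcodeMyVersion | programmation dynamique/test_debuger.py | select_subarrays
-- ===== SOURCE A (Python) =====
-- def select_subarrays(nums, minK, maxK):
--     result = []
--     n = len(nums)
--
--     for i in range(n):
--         for j in range(i, n):
--             subarray = nums[i:j+1]
--             if min(subarray) == minK and max(subarray) == maxK:
--                 result.append(subarray)
--
--     return result
-- ===== SOURCE B (Python) =====
-- def select_subarrays(nums, minK, maxK):
--     result = []
--     n = len(nums)
--     for i in range(n):
--         cur_min = cur_max = nums[i]
--         sub = []
--         for v in nums[i:]: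
--             sub.append(v)
--             if v < cur_min:
--                 cur_min = v
--             if v > cur_max:
--                 cur_max = v
--             if cur_min == minK and cur_max == maxK:
--                 result.append(list(sub))
--     return result
-- ===== Notes on version B (the rewrite author's own statement) =====
-- stated objective: faster
-- what changed: Replaces A's per-subarray min()/max() scans over a fresh slice with an incremental running min/max per start index, appending to the subarray as it grows, so each (i,j) pair costs O(1) besides the output copy.
import Mathlib
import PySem

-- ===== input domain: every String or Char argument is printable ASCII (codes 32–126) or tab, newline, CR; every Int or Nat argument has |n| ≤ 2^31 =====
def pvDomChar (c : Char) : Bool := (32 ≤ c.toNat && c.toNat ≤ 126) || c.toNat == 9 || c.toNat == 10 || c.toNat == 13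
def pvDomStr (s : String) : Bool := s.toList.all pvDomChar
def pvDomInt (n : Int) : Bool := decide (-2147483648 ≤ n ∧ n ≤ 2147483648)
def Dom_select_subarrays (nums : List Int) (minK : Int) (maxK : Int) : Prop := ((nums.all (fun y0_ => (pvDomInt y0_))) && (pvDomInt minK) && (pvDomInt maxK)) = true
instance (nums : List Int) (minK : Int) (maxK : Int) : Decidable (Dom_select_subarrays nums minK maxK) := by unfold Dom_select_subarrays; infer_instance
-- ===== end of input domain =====

-- B replaces A's per-subarray min()/max() scans by running min/max per start index: O(n^2) instead of O(n^3) (+ output cost).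

-- ===== PORT A =====
def select_subarrays (nums : List Int) (minK : Int) (maxK : Int) : List (List Int) :=
  let n : Int := nums.length
  (PySem.List.pyRange 0 n).foldl (fun result i =>
    (PySem.List.pyRange i n).foldl (fun result j =>
      let subarray := PySem.List.slice nums (some i) (some (j + 1))
      if (PySem.List.min? subarray (fun x => x) == some minK) &&
         (PySem.List.max? subarray (fun x => x) == some maxK)
      then result ++ [subarray] else result) result) []

-- ===== PORT B =====
-- inner loop of B: 'for v in nums[i:]' carrying (sub, cur_min, cur_max, result)
def pvInnerB (minK maxK : Int) : List Int → List Int → Int → Int → List (List Int) → List (List Int)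
  | [], _, _, _, result => result
  | v :: rest, sub, curMin, curMax, result =>
    let sub' := sub ++ [v]
    let curMin' := if v < curMin then v else curMin
    let curMax' := if v > curMax then v else curMax
    pvInnerB minK maxK rest sub' curMin' curMax'
      (if curMin' == minK && curMax' == maxK then result ++ [sub'] else result)

def select_subarrays_alt (nums : List Int) (minK : Int) (maxK : Int) : List (List Int) :=
  let n : Int := nums.length
  (PySem.List.pyRange 0 n).foldl (fun result i =>
    pvInnerB minK maxK (PySem.List.slice nums (some i)) []
      (PySem.List.pyGetD nums i 0) (PySem.List.pyGetD nums i 0) result) []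

-- ===== PRECONDITION & SPEC =====
def Spec_select_subarrays (nums : List Int) (minK : Int) (maxK : Int) (out : List (List Int)) : Prop := out = select_subarrays_alt nums minK maxK
instance (nums : List Int) (minK : Int) (maxK : Int) (out : List (List Int)) : Decidable (Spec_select_subarrays nums minK maxK out) := by unfold Spec_select_subarrays; infer_instance

-- ===== CLAIM (what is proved, stated in full; the proofs are below) =====
def Claim_equal_select_subarrays : Prop := ∀ (nums : List Int) (minK : Int) (maxK : Int), Dom_select_subarrays nums minK maxK → Spec_select_subarrays nums minK maxK (select_subarrays nums minK maxK)

-- ===== LEMMAS AND PROOFS =====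

-- pyRange over Nat-cast bounds is a shifted List.range
lemma pvPyRange_shift (i d : Nat) :
    PySem.List.pyRange (i : Int) ((i + d : Nat) : Int)
      = (List.range d).map (fun k => ((i + k : Nat) : Int)) := by
  induction d generalizing i with
  | zero => simp [PySem.List.pyRange]
  | succ d ih =>
    rw [PySem.List.pyRange_one_cons (by exact_mod_cast Nat.lt_add_of_pos_right (Nat.succ_pos d))]
    have h1 : ((i : Int) + 1) = ((i + 1 : Nat) : Int) := by push_cast; ring
    have h2 : ((i + (d + 1) : Nat) : Int) = (((i + 1) + d : Nat) : Int) := by push_cast; ring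
    rw [h1, h2, ih (i + 1)]
    rw [List.range_succ_eq_map]
    simp [List.map_map, Function.comp_def, Nat.succ_eq_add_one]
    intro a _
    omega

-- B's inner loop, characterised: it emits pre ++ (take (k+1) l) for exactly those k whose
-- running min/max (seeded with m, M) hit minK, maxK
lemma pvInnerB_eq (minK maxK : Int) (l : List Int) :
    ∀ (pre : List Int) (m M : Int) (res : List (List Int)),
    pvInnerB minK maxK l pre m M res
      = res ++ ((List.range l.length).filter (fun k =>
            ((l.take (k+1)).foldl min m == minK) && ((l.take (k+1)).foldl max M == maxK))).map
          (fun k => pre ++ l.take (k+1)) := by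
  induction l with
  | nil => intro pre m M res; simp [pvInnerB]
  | cons v t ih =>
    intro pre m M res
    have hmin : (if v < m then v else m) = min m v := by
      rw [min_def]; split <;> split <;> omega
    have hmax : (if v > M then v else M) = max M v := by
      rw [max_def]; split <;> split <;> omega
    simp only [pvInnerB, hmin, hmax]
    rw [ih (pre ++ [v]) (min m v) (max M v)]
    simp only [List.length_cons, List.range_succ_eq_map, List.filter_cons, List.filter_map]
    simp only [List.take_succ_cons, List.take_zero, List.foldl_cons, List.foldl_nil,
      Function.comp_def, Nat.succ_eq_add_one]
    by_cases hc : (min m v == minK) && (max M v == maxK)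
    · simp [hc, List.map_map, Function.comp_def, List.append_assoc]
    · simp [hc, List.map_map, Function.comp_def, List.append_assoc]

-- the two per-start-index loop bodies agree
lemma pvBody_eq (nums : List Int) (minK maxK : Int) (i : Nat) (hi : i < nums.length)
    (res : List (List Int)) :
    (PySem.List.pyRange (i : Int) (nums.length : Int)).foldl (fun result j =>
      let subarray := PySem.List.slice nums (some (i : Int)) (some (j + 1))
      if (PySem.List.min? subarray (fun x => x) == some minK) &&
         (PySem.List.max? subarray (fun x => x) == some maxK)
      then result ++ [subarray] else result) res
    = pvInnerB minK maxK (PySem.List.slice nums (some (i : Int))) []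
        (PySem.List.pyGetD nums (i : Int) 0) (PySem.List.pyGetD nums (i : Int) 0) res := by
  set a := nums[i] with ha
  have hdrop : List.drop i nums = a :: List.drop (i + 1) nums := List.drop_eq_getElem_cons hi
  set t := List.drop (i + 1) nums with ht
  -- B side
  rw [PySem.List.slice_from nums (by positivity), PySem.List.pyGetD_natCast]
  have hgd : nums.getD i 0 = a := List.getD_eq_getElem nums 0 hi
  rw [Int.toNat_natCast, hgd, hdrop, pvInnerB_eq]
  -- A side: rewrite the range
  obtain ⟨d, hd⟩ : ∃ d, nums.length = i + d := ⟨nums.length - i, by omega⟩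
  rw [hd, pvPyRange_shift, List.foldl_map]
  have hslice : ∀ k : Nat, PySem.List.slice nums (some (i : Int)) (some (((i + k : Nat) : Int) + 1))
      = a :: List.take k t := by
    intro k
    have : ((i + k : Nat) : Int) + 1 = ((i + k + 1 : Nat) : Int) := by push_cast; ring
    rw [this, PySem.List.slice_natCast]
    have : i + k + 1 - i = k + 1 := by omega
    rw [this, hdrop, List.take_succ_cons, ht]
  have hlen : (a :: t).length = d := by
    simp only [List.length_cons, ht, List.length_drop]; omega
  rw [show List.range (a :: t).length = List.range d from by rw [hlen]]
  -- turn A's fold into filter/map form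
  have := PySem.List.foldl_append_if
    (p := fun k : Nat => ((List.take (k+1) (a :: t)).foldl min a == minK) &&
          ((List.take (k+1) (a :: t)).foldl max a == maxK))
    (f := fun k : Nat => List.take (k+1) (a :: t)) (l := List.range d) (acc := res)
  simp only [List.nil_append]
  rw [← this]
  apply PySem.List.foldl_congr_mem
  intro acc k _
  simp only [hslice k, PySem.List.min?_id_cons, PySem.List.max?_id_cons,
    List.take_succ_cons, List.foldl_cons, min_self, max_self, Option.some_beq_some]

lemma pv_main (nums : List Int) (minK maxK : Int) :
    select_subarrays nums minK maxK = select_subarrays_alt nums minK maxK := by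
  unfold select_subarrays select_subarrays_alt
  simp only []
  rw [show (nums.length : Int) = ((nums.length : Nat) : Int) from rfl,
      PySem.List.pyRange_zero_natCast, List.foldl_map, List.foldl_map]
  apply PySem.List.foldl_congr_mem
  intro acc i hi
  rw [List.mem_range] at hi
  exact pvBody_eq nums minK maxK i hi acc

-- ===== VERDICT (by name: the statement is the Claim_ definition above) =====
theorem select_subarrays_spec : Claim_equal_select_subarrays := by
  intro nums minK maxK _
  unfold Spec_select_subarrays
  exact pv_main nums minK maxK
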